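-- pv_equiv track=rewrite | github.com/kopylovvlad/mushroom_classification | csv_helper.py | csv_to_vector
-- ===== SOURCE A (Python) =====
-- from typing import List, Dict, Tuple
--
-- def csv_to_vector(filereader) -> Tuple[List[str], List[str], List[List[int]]]:
--     '''
--     convert csv-file to typle without first column: (item_names, props, data)
--     '''
--     item_names: List[str] = []
--     props: List[str] = []
--     pre_data: List[List[str]] = []
--     data: List[List[int]] = []
--     i: int = 0
--     j: int = 0
--     for row in filereader:
--         i += 1
--         if i == 1:
--             props = row
--             continue
--         title: str = str(i) + '_' + row[0]
--         item_names.append(title)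
--         tmp_data: List[str] = []
--         j = 0
--         for symbol in row:
--             j += 1
--             if j == 1:
--                 # without first col
--                 continue
--             else:
--                 tmp_data.append(symbol)
--         pre_data.append(tmp_data)
--
--     #
--     # pre_data to data
--     #
--     data_dict: List[Dict[str, int]] = []
--     i = 0
--     for i in range(len(pre_data[0])):
--         data_dict.append({})
--
--     i = 0
--     for i in range(len(pre_data[0])):
--         for j in range(len(pre_data)):
--             row = pre_data[j]
--             row_symbol: str = row[i]
--             h = data_dict[i]
--             if not row_symbol in list(h.keys()):
--                 data_dict[i][row_symbol] = len(list(h.keys())) + 1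
--     i = 0
--     for row in pre_data:
--         tmp_data = []
--         for i in range(len(row)):
--             symbol = row[i]
--             tmp_data.append(data_dict[i][symbol])
--         data.append(tmp_data)
--
--     return (item_names, props, data)
-- ===== SOURCE B (Python) =====
-- from typing import List, Tuple
--
--
-- def csv_to_vector(filereader) -> Tuple[List[str], List[str], List[List[int]]]:
--     '''single row-major pass: encode each row while assigning codes on first sight'''
--     props = filereader[0]
--     body = filereader[1:]
--     item_names = ['%d_%s' % (i, row[0]) for i, row in enumerate(body, 2)]
--     ncols = len(body[0]) - 1
--     codebooks = [{} for _ in range(ncols)]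
--     data = []
--     for row in body:
--         encoded = []
--         for i, symbol in enumerate(row[1:]):
--             book = codebooks[i]
--             if symbol not in book:
--                 book[symbol] = len(book) + 1
--             encoded.append(book[symbol])
--         data.append(encoded)
--     return (item_names, props, data)
-- ===== Notes on version B (the rewrite author's own statement) =====
-- stated objective: faster
-- what changed: A builds per-column code dictionaries in a column-major index pass (testing membership via 'symbol in list(h.keys())', a linear scan per cell) and then re-scans the table row-major to encode; B fuses this into one row-major pass that assigns a fresh code at first sight of a symbol via an O(1) dict membership test and emits the code in the same iteration (codes agree because each column is visited top-down in both).
import Mathlib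
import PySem

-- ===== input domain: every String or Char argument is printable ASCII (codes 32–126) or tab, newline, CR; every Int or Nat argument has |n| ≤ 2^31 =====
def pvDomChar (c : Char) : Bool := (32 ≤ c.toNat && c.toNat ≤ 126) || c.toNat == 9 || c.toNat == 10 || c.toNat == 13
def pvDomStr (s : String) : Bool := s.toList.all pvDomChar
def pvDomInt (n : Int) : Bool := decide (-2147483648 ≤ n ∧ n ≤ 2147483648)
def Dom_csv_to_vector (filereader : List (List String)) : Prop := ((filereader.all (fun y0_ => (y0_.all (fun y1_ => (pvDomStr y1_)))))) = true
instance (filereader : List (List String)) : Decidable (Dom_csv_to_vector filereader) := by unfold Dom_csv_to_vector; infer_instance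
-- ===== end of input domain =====

-- B replaces A's column-major dictionary-building pass plus a second row-major encoding pass by one
-- fused row-major pass assigning codes at first sight (O(1) dict test instead of A's scan of
-- list(h.keys()); measured faster); return values proved equal on Pre_.

-- ===== PORT A =====
-- inner 'for symbol in row' loop (j counter skips the first column)
def aTmpStep (st : Int × List String) (symbol : String) : Int × List String :=
  let j := st.1 + 1
  if j == 1 then (j, st.2) else (j, st.2 ++ [symbol])

-- body of 'for row in filereader' (state: i, props, item_names, pre_data)
def aRowStep (st : Int × List String × List String × List (List String)) (row : List String) :
    Int × List String × List String × List (List String) :=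
  let i := st.1 + 1
  if i == 1 then (i, row, st.2.2.1, st.2.2.2)
  else
    let title := PySem.Int.toStr i ++ "_" ++ PySem.List.pyGetD row 0 ""
    let tmp := (row.foldl aTmpStep (0, [])).2
    (i, st.2.1, st.2.2.1 ++ [title], st.2.2.2 ++ [tmp])

-- body of the column pass for fixed column i: row = pre_data[j] is passed in
def aColF (i : Int) (dd : List (PySem.Dict String Int)) (row : List String) :
    List (PySem.Dict String Int) :=
  let row_symbol := PySem.List.pyGetD row i ""
  let h := PySem.List.pyGetD dd i PySem.Dict.empty
  if !(h.contains row_symbol) then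
    PySem.List.pySetD dd i (h.insert row_symbol ((h.keys.length : Int) + 1))
  else dd

-- 'for i in range(len(row)): tmp_data.append(data_dict[i][symbol])'
def aEncRow (data_dict : List (PySem.Dict String Int)) (row : List String) : List Int :=
  (PySem.List.pyRange 0 (row.length : Int) 1).foldl
    (fun tmp i =>
      tmp ++ [(PySem.List.pyGetD data_dict i PySem.Dict.empty).getD (PySem.List.pyGetD row i "") 0]) []

def csv_to_vector (filereader : List (List String)) : List String × List String × List (List Int) :=
  let s := filereader.foldl aRowStep (0, ([], [], []))
  let props := s.2.1
  let item_names := s.2.2.1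
  let pre_data := s.2.2.2
  let ncols : Nat := (PySem.List.pyGetD pre_data 0 []).length
  let dd0 := (PySem.List.pyRange 0 (ncols : Int) 1).foldl
    (fun (dd : List (PySem.Dict String Int)) _ => dd ++ [PySem.Dict.empty]) []
  let data_dict := (PySem.List.pyRange 0 (ncols : Int) 1).foldl
    (fun dd i =>
      (PySem.List.pyRange 0 (pre_data.length : Int) 1).foldl
        (fun dd j => aColF i dd (PySem.List.pyGetD pre_data j [])) dd) dd0
  let data := pre_data.foldl (fun data row => data ++ [aEncRow data_dict row]) []
  (item_names, props, data)

-- ===== PORT B =====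
-- 'if symbol not in book: book[symbol] = len(book) + 1'
def bUpd (book : PySem.Dict String Int) (symbol : String) : PySem.Dict String Int :=
  if book.contains symbol then book else book.insert symbol ((book.size : Int) + 1)

-- body of 'for i, symbol in enumerate(row[1:])' (state: codebooks, encoded)
def bEncStep (st : List (PySem.Dict String Int) × List Int) (p : Int × String) :
    List (PySem.Dict String Int) × List Int :=
  let book := bUpd (PySem.List.pyGetD st.1 p.1 PySem.Dict.empty) p.2
  (PySem.List.pySetD st.1 p.1 book, st.2 ++ [book.getD p.2 0])

-- body of 'for row in body' (state: codebooks, data)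
def bRowStep (st : List (PySem.Dict String Int) × List (List Int)) (row : List String) :
    List (PySem.Dict String Int) × List (List Int) :=
  let r := (PySem.List.enumerate (PySem.List.slice row (some 1) none) 0).foldl bEncStep (st.1, [])
  (r.1, st.2 ++ [r.2])

def csv_to_vector_alt (filereader : List (List String)) : List String × List String × List (List Int) :=
  let props := PySem.List.pyGetD filereader 0 []
  let body := PySem.List.slice filereader (some 1) none
  let item_names := (PySem.List.enumerate body 2).map
    (fun p => PySem.Int.toStr p.1 ++ "_" ++ PySem.List.pyGetD p.2 0 "")
  let ncols : Int := ((PySem.List.pyGetD body 0 []).length : Int) - 1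
  let codebooks := (PySem.List.pyRange 0 ncols 1).map
    (fun _ => (PySem.Dict.empty : PySem.Dict String Int))
  let r := body.foldl bRowStep (codebooks, [])
  (item_names, props, r.2)

-- ===== PRECONDITION & SPEC =====
-- Pre_ = exactly the inputs where the Python A returns: at least one data row, every data row
-- nonempty and of the same length (otherwise A raises IndexError on pre_data[0], row[0],
-- row[i] or data_dict[i]).
def Pre_csv_to_vector (filereader : List (List String)) : Prop :=
  2 ≤ filereader.length ∧
    ∀ r ∈ filereader.tail, 1 ≤ r.length ∧ r.length = (filereader.tail.headD []).length
instance (filereader : List (List String)) : Decidable (Pre_csv_to_vector filereader) := by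
  unfold Pre_csv_to_vector; infer_instance

def pvWitness_csv_to_vector : List (List String) :=
  [["id", "c1", "c2"], ["m1", "x", "y"], ["m2", "x", "z"]]

def Spec_csv_to_vector (filereader : List (List String)) (out : List String × List String × List (List Int)) : Prop := out = csv_to_vector_alt filereader
instance (filereader : List (List String)) (out : List String × List String × List (List Int)) : Decidable (Spec_csv_to_vector filereader out) := by unfold Spec_csv_to_vector; infer_instance

-- ===== CLAIM (what is proved, stated in full; the proofs are below) =====
def Claim_equal_csv_to_vector : Prop := ∀ (filereader : List (List String)), Dom_csv_to_vector filereader → Pre_csv_to_vector filereader → Spec_csv_to_vector filereader (csv_to_vector filereader)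

-- ===== LEMMAS AND PROOFS =====

-- proof-side abbreviations
def mkDict (l : List String) : PySem.Dict String Int := l.foldl bUpd PySem.Dict.empty
def colD (P : List (List String)) (i : Nat) : List String := P.map (fun r => r.getD i "")

-- ---- A, first loop ----
theorem tmp_go (xs : List String) : ∀ (j : Int) (acc : List String), 1 ≤ j →
    (xs.foldl aTmpStep (j, acc)).2 = acc ++ xs := by
  induction xs with
  | nil => intro j acc _; simp
  | cons x xs ih =>
    intro j acc hj
    have h1 : ((j + 1 == 1) = false) := by simp; omega
    simp only [List.foldl_cons, aTmpStep, h1, Bool.false_eq_true, if_false]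
    rw [ih (j + 1) (acc ++ [x]) (by omega)]
    simp

theorem tmp_spec (row : List String) :
    (row.foldl aTmpStep ((0 : Int), ([] : List String))).2 = row.drop 1 := by
  cases row with
  | nil => simp
  | cons x xs =>
    simp only [List.foldl_cons, aTmpStep]
    norm_num
    rw [tmp_go xs 1 [] (by omega)]
    simp

theorem rows_go (body : List (List String)) : ∀ (i : Int) (props itn : List String)
    (pd : List (List String)), 1 ≤ i →
    body.foldl aRowStep (i, props, itn, pd)
    = (i + body.length, props,
       itn ++ (PySem.List.enumerate body (i + 1)).map
         (fun p => PySem.Int.toStr p.1 ++ "_" ++ PySem.List.pyGetD p.2 0 ""),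
       pd ++ body.map (fun r => r.drop 1)) := by
  induction body with
  | nil => intro i props itn pd _; simp
  | cons row rest ih =>
    intro i props itn pd hi
    have h1 : ((i + 1 == 1) = false) := by simp; omega
    simp only [List.foldl_cons, aRowStep, h1, Bool.false_eq_true, if_false, tmp_spec]
    rw [ih (i + 1) props _ _ (by omega)]
    simp only [PySem.List.enumerate_cons, List.map_cons, List.append_assoc, List.length_cons,
      List.singleton_append, Prod.mk.injEq]
    exact ⟨by push_cast; ring, trivial⟩

-- ---- dictionary facts ----
theorem contains_bUpd_mono (h : PySem.Dict String Int) (x s : String)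
    (hc : h.contains s = true) : (bUpd h x).contains s = true := by
  unfold bUpd; split
  · exact hc
  · simp [PySem.Dict.contains_insert, hc]

theorem contains_foldl_mono (l : List String) : ∀ (h : PySem.Dict String Int) (s : String),
    h.contains s = true → (l.foldl bUpd h).contains s = true := by
  induction l with
  | nil => intro h s hc; simpa using hc
  | cons x l ih => intro h s hc; exact ih _ _ (contains_bUpd_mono h x s hc)

theorem contains_foldl_of_mem (l : List String) : ∀ (h : PySem.Dict String Int) (s : String),
    s ∈ l → (l.foldl bUpd h).contains s = true := by
  induction l with
  | nil => intro h s hs; simp at hs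
  | cons x l ih =>
    intro h s hs
    rcases List.mem_cons.mp hs with rfl | hs
    · refine contains_foldl_mono l _ s ?_
      unfold bUpd; split
      · assumption
      · exact PySem.Dict.contains_insert_self _ _ _
    · exact ih _ _ hs

theorem getD_bUpd_of_contains (h : PySem.Dict String Int) (x s : String) (d : Int)
    (hc : h.contains s = true) : (bUpd h x).getD s d = h.getD s d := by
  unfold bUpd; split
  · rfl
  · next hx =>
    refine PySem.Dict.getD_insert_of_ne _ _ _ ?_
    intro rfl_eq
    rw [rfl_eq] at hc
    simp [hc] at hx

theorem getD_foldl_of_contains (l : List String) : ∀ (h : PySem.Dict String Int) (s : String)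
    (d : Int), h.contains s = true → (l.foldl bUpd h).getD s d = h.getD s d := by
  induction l with
  | nil => intro h s d _; rfl
  | cons x l ih =>
    intro h s d hc
    rw [List.foldl_cons, ih _ _ _ (contains_bUpd_mono h x s hc),
      getD_bUpd_of_contains h x s d hc]

theorem getD_mkDict_prefix (l l2 : List String) (s : String) (d : Int) (hs : s ∈ l) :
    (mkDict (l ++ l2)).getD s d = (mkDict l).getD s d := by
  unfold mkDict
  rw [List.foldl_append]
  exact getD_foldl_of_contains l2 _ s d (contains_foldl_of_mem l _ s hs)

-- A writes len(list(h.keys()))+1 where B writes len(book)+1: the same number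
theorem keys_length_eq_size (h : PySem.Dict String Int) : h.keys.length = h.size := by
  simp [PySem.Dict.keys, PySem.Dict.size]

-- ---- A, column pass ----
theorem aColF_eq (i : Nat) (dd : List (PySem.Dict String Int)) (row : List String)
    (hi : i < dd.length) :
    aColF (i : Int) dd row
      = dd.set i (bUpd (dd.getD i PySem.Dict.empty) (row.getD i "")) := by
  simp only [aColF, bUpd, PySem.List.pyGetD_natCast, PySem.List.pySetD_natCast,
    keys_length_eq_size, List.getD]
  have hdd : dd[i]?.getD PySem.Dict.empty = dd[i] := by
    simp [List.getElem?_eq_getElem hi]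
  by_cases hc : ((dd[i]?.getD PySem.Dict.empty).contains (row[i]?.getD "")) = true
  · rw [if_neg (by simp [hc]), if_pos hc, hdd, List.set_getElem_self]
  · rw [if_pos (by simp [hc]), if_neg hc]

theorem A_colinner (pre_data : List (List String)) (i : Nat) : ∀ (dd : List (PySem.Dict String Int)),
    i < dd.length →
    pre_data.foldl (fun dd row => aColF (i : Int) dd row) dd
      = dd.set i (pre_data.foldl (fun h row => bUpd h (row.getD i ""))
          (dd.getD i PySem.Dict.empty)) := by
  induction pre_data with
  | nil =>
    intro dd hi
    rw [List.foldl_nil, List.foldl_nil, List.getD_eq_getElem dd _ hi, List.set_getElem_self]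
  | cons q P ih =>
    intro dd hi
    simp only [List.foldl_cons]
    rw [aColF_eq i dd q hi, ih _ (by simpa using hi)]
    rw [List.set_set, List.getD_eq_getElem _ _ (by simpa using hi), List.getElem_set_self]

theorem A_colpass (pre_data : List (List String)) : ∀ (k : Nat) (X : List (PySem.Dict String Int)),
    (PySem.List.pyRange (X.length : Int) ((X.length + k : Nat) : Int) 1).foldl
      (fun dd i =>
        (PySem.List.pyRange 0 (pre_data.length : Int) 1).foldl
          (fun dd j => aColF i dd (PySem.List.pyGetD pre_data j [])) dd)
      (X ++ List.replicate k PySem.Dict.empty)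
    = X ++ (List.range k).map (fun m => mkDict (colD pre_data (X.length + m))) := by
  intro k
  induction k with
  | zero =>
    intro X
    have h0 : PySem.List.pyRange (X.length : Int) ((X.length + 0 : Nat) : Int) 1 = [] :=
      PySem.List.pyRange_one_eq_nil (by simp)
    rw [h0]; simp
  | succ k ih =>
    intro X
    have hcons : PySem.List.pyRange (X.length : Int) ((X.length + (k + 1) : Nat) : Int) 1
        = (X.length : Int)
          :: PySem.List.pyRange ((X.length : Int) + 1) ((X.length + (k + 1) : Nat) : Int) 1 :=
      PySem.List.pyRange_one_cons (by push_cast; omega)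
    rw [hcons, List.foldl_cons]
    rw [PySem.List.foldl_pyRange_zero_pyGetD' pre_data []
      (fun dd row => aColF (X.length : Int) dd row)
      (X ++ List.replicate (k + 1) PySem.Dict.empty)]
    rw [A_colinner pre_data X.length (X ++ List.replicate (k + 1) PySem.Dict.empty) (by simp)]
    have hget : (X ++ List.replicate (k + 1) PySem.Dict.empty).getD X.length PySem.Dict.empty
        = PySem.Dict.empty := by
      rw [List.getD_eq_getElem _ _ (by simp)]
      rw [List.getElem_append_right (by omega)]
      simp
    have hset : (X ++ List.replicate (k + 1) PySem.Dict.empty).set X.length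
          (mkDict (colD pre_data X.length))
        = (X ++ [mkDict (colD pre_data X.length)]) ++ List.replicate k PySem.Dict.empty := by
      rw [List.set_append_right _ _ (by omega)]
      simp [List.replicate_succ]
    have hfold : pre_data.foldl (fun h row => bUpd h (row.getD X.length ""))
        PySem.Dict.empty = mkDict (colD pre_data X.length) := by
      unfold mkDict colD
      rw [List.foldl_map]
    rw [hget, hfold, hset]
    have hcast : ((X.length : Int) + 1) = (((X ++ [mkDict (colD pre_data X.length)]).length : Nat) : Int) := by
      simp
    have hcast2 : ((X.length + (k + 1) : Nat) : Int)
        = (((X ++ [mkDict (colD pre_data X.length)]).length + k : Nat) : Int) := by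
      simp; omega
    rw [hcast, hcast2, ih (X ++ [mkDict (colD pre_data X.length)])]
    have hfe : ((fun m => mkDict (colD pre_data (X.length + m))) ∘ Nat.succ)
        = fun m => mkDict (colD pre_data (X.length + 1 + m)) := by
      funext m
      simp only [Function.comp_apply]
      congr 2
      omega
    rw [List.range_succ_eq_map, List.map_cons, List.map_map, hfe]
    simp [List.append_assoc, List.length_append]

-- ---- A, encoding pass ----
theorem aEncRow_eq (ddict : List (PySem.Dict String Int)) (row : List String) :
    aEncRow ddict row
      = (List.range row.length).map
          (fun i => (ddict.getD i PySem.Dict.empty).getD (row.getD i "") 0) := by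
  unfold aEncRow
  rw [PySem.List.foldl_append_singleton_eq_map]
  rw [PySem.List.pyRange_one]
  simp [List.map_map, Function.comp]

-- ---- B, inner loop ----
theorem B_inner (l : List String) : ∀ (cbsL cbsR : List (PySem.Dict String Int)) (enc : List Int),
    l.length = cbsR.length →
    (PySem.List.enumerate l (cbsL.length : Int)).foldl bEncStep (cbsL ++ cbsR, enc)
    = (cbsL ++ List.zipWith (fun s d => bUpd d s) l cbsR,
       enc ++ List.zipWith (fun s d => (bUpd d s).getD s 0) l cbsR) := by
  induction l with
  | nil =>
    intro cbsL cbsR enc hlen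
    have : cbsR = [] := List.eq_nil_of_length_eq_zero (by simp at hlen; omega)
    subst this; simp [PySem.List.enumerate]
  | cons s l ih =>
    intro cbsL cbsR enc hlen
    cases cbsR with
    | nil => simp at hlen
    | cons d r =>
      rw [PySem.List.enumerate_cons, List.foldl_cons]
      have hget : PySem.List.pyGetD (cbsL ++ d :: r) ((cbsL.length : Nat) : Int)
          PySem.Dict.empty = d := by
        rw [PySem.List.pyGetD_natCast, List.getD_eq_getElem _ _ (by simp)]
        rw [List.getElem_append_right (by omega)]
        simp
      have hset : (cbsL ++ d :: r).set cbsL.length (bUpd d s) = (cbsL ++ [bUpd d s]) ++ r := by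
        rw [List.set_append_right _ _ (by omega)]
        simp
      simp only [bEncStep, hget, PySem.List.pySetD_natCast, hset]
      have hcast : ((cbsL.length : Int) + 1) = (((cbsL ++ [bUpd d s]).length : Nat) : Int) := by
        simp
      rw [hcast, ih (cbsL ++ [bUpd d s]) r _ (by simpa using hlen)]
      simp [List.append_assoc]

-- ---- B, outer loop ----
theorem drop_cons_parts {α : Type} (P : List α) (j : Nat) (q : α) (S : List α)
    (h : P.drop j = q :: S) : ∃ (hj : j < P.length), P[j] = q ∧ S = P.drop (j + 1) := by
  have hj : j < P.length := by
    by_contra hlt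
    rw [List.drop_eq_nil_of_le (by omega)] at h
    simp at h
  have h2 := List.getElem_cons_drop (as := P) (i := j) hj
  rw [h] at h2
  injection h2 with h1 hrest
  exact ⟨hj, h1, hrest.symm⟩

theorem B_loop (P : List (List String)) (ncols : Nat)
    (HL : ∀ q ∈ P, q.length = ncols) :
    ∀ (S : List (List String)) (j : Nat) (data0 : List (List Int)), S = P.drop j →
    S.foldl (fun st q =>
        let r := (PySem.List.enumerate q 0).foldl bEncStep (st.1, [])
        (r.1, st.2 ++ [r.2]))
      ((List.range ncols).map (fun i => mkDict ((colD P i).take j)), data0)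
    = ((List.range ncols).map (fun i => mkDict ((colD P i).take (j + S.length))),
       data0 ++ S.map (fun q =>
         (List.range ncols).map (fun i => (mkDict (colD P i)).getD (q.getD i "") 0))) := by
  intro S
  induction S with
  | nil => intro j data0 _; simp
  | cons q S ih =>
    intro j data0 hS
    obtain ⟨hj, hq, hS'⟩ := drop_cons_parts P j q S hS.symm
    have hqP : q ∈ P := hq ▸ List.getElem_mem hj
    have hqlen : q.length = ncols := HL q hqP
    have hcol_len : ∀ i, (colD P i).length = P.length := by intro i; simp [colD]
    -- the element of column i at row j is q's i-th entry
    have hcolj : ∀ i, i < ncols → (colD P i)[j]'(by rw [hcol_len]; exact hj) = q.getD i "" := by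
      intro i _
      simp only [colD]
      rw [List.getElem_map]
      rw [hq]
    have htake : ∀ i, i < ncols →
        (colD P i).take (j + 1) = (colD P i).take j ++ [q.getD i ""] := by
      intro i hi
      rw [List.take_add_one]
      rw [List.getElem?_eq_getElem (by rw [hcol_len]; exact hj)]
      rw [hcolj i hi]
      rfl
    simp only [List.foldl_cons]
    have hB := B_inner q [] ((List.range ncols).map (fun i => mkDict ((colD P i).take j))) []
      (by simp [hqlen])
    simp only [List.nil_append, List.length_nil, Nat.cast_zero] at hB
    -- identify the two zipWith results with range-maps
    have hzip1 : List.zipWith (fun s d => bUpd d s) q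
        ((List.range ncols).map (fun i => mkDict ((colD P i).take j)))
        = (List.range ncols).map (fun i => mkDict ((colD P i).take (j + 1))) := by
      apply List.ext_getElem
      · simp [hqlen]
      · intro n h1 h2
        rw [List.getElem_zipWith]
        simp only [List.getElem_map, List.getElem_range]
        have hn : n < ncols := by simpa using h2
        rw [htake n hn]
        unfold mkDict
        rw [List.foldl_append]
        simp only [List.foldl_cons, List.foldl_nil]
        congr 1
        rw [List.getD_eq_getElem q _ (by omega)]
    have hzip2 : List.zipWith (fun s d => (bUpd d s).getD s 0) q
        ((List.range ncols).map (fun i => mkDict ((colD P i).take j)))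
        = (List.range ncols).map (fun i => (mkDict (colD P i)).getD (q.getD i "") 0) := by
      apply List.ext_getElem
      · simp [hqlen]
      · intro n h1 h2
        rw [List.getElem_zipWith]
        simp only [List.getElem_map, List.getElem_range]
        have hn : n < ncols := by simpa using h2
        have hbu : bUpd (mkDict ((colD P n).take j)) (q[n]'(by omega))
            = mkDict ((colD P n).take (j + 1)) := by
          have := htake n hn
          unfold mkDict
          rw [this, List.foldl_append]
          simp only [List.foldl_cons, List.foldl_nil]
          congr 1
          rw [List.getD_eq_getElem q _ (by omega)]
        have hmem : q[n]'(by omega) ∈ (colD P n).take (j + 1) := by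
          rw [htake n hn]
          rw [show q.getD n "" = q[n]'(by omega) from List.getD_eq_getElem q _ (by omega)]
          simp
        have hpre : (mkDict (colD P n)).getD (q[n]'(by omega)) 0
            = (mkDict ((colD P n).take (j + 1))).getD (q[n]'(by omega)) 0 := by
          conv_lhs => rw [← List.take_append_drop (j + 1) (colD P n)]
          exact getD_mkDict_prefix _ _ _ _ hmem
        rw [hbu, List.getD_eq_getElem q _ (by omega), hpre]
    rw [hB, hzip1, hzip2, ih (j + 1) _ hS']
    have hlen2 : j + 1 + S.length = j + (S.length + 1) := by omega
    simp only [List.length_cons, hlen2, List.map_cons, List.append_assoc, List.cons_append,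
      List.nil_append]

-- constant-comprehension loops produce replicate
theorem range_map_empty (n : Nat) :
    (PySem.List.pyRange 0 (n : Int) 1).map (fun _ => (PySem.Dict.empty : PySem.Dict String Int))
      = List.replicate n PySem.Dict.empty := by
  rw [List.eq_replicate_iff]
  constructor
  · simp [PySem.List.length_pyRange_one]
  · intro b hb; simp at hb; exact hb.2

theorem dd0_replicate (n : Nat) :
    (PySem.List.pyRange 0 (n : Int) 1).foldl
        (fun (dd : List (PySem.Dict String Int)) _ => dd ++ [PySem.Dict.empty]) []
      = List.replicate n PySem.Dict.empty := by
  rw [PySem.List.foldl_append_singleton_eq_map]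
  simp [range_map_empty n]

-- ===== VERDICT (by name: the statement is the Claim_ definition above) =====
theorem csv_to_vector_spec : Claim_equal_csv_to_vector := by
  intro fr _hDom hPre
  unfold Spec_csv_to_vector
  obtain ⟨hlen, hrows⟩ := hPre
  rcases fr with _ | ⟨r0, body⟩
  · simp at hlen
  rcases body with _ | ⟨b0, rest⟩
  · simp at hlen
  have hrows' : ∀ r ∈ b0 :: rest, 1 ≤ r.length ∧ r.length = b0.length := by
    simpa using hrows
  have hb0 : 1 ≤ b0.length := (hrows' b0 (by simp)).1
  have HL : ∀ q ∈ (b0 :: rest).map (fun r => r.drop 1), q.length = b0.length - 1 := by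
    intro q hq
    obtain ⟨r, hr, rfl⟩ := List.mem_map.mp hq
    have h2 := (hrows' r hr).2
    simp [h2]
  -- ---- evaluate A ----
  have hstep : aRowStep (0, ([], [], [])) r0 = (1, r0, [], []) := by
    simp [aRowStep]
  have hcp := A_colpass ((b0 :: rest).map (fun r => r.drop 1)) (b0.length - 1)
    ([] : List (PySem.Dict String Int))
  simp only [List.length_nil, Nat.cast_zero, List.nil_append, zero_add,
    List.map_cons] at hcp
  have hA : csv_to_vector (r0 :: b0 :: rest)
      = ((PySem.List.enumerate (b0 :: rest) 2).map
           (fun p => PySem.Int.toStr p.1 ++ "_" ++ PySem.List.pyGetD p.2 0 ""),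
         r0,
         ((b0 :: rest).map (fun r => r.drop 1)).map (fun row =>
           (List.range (b0.length - 1)).map
             (fun i => (mkDict (colD ((b0 :: rest).map (fun r => r.drop 1)) i)).getD
               (row.getD i "") 0))) := by
    simp only [csv_to_vector]
    rw [List.foldl_cons, hstep, rows_go (b0 :: rest) 1 r0 [] [] (by norm_num)]
    dsimp only
    simp only [List.nil_append, List.map_cons, PySem.List.pyGetD_zero_cons, List.length_drop]
    rw [dd0_replicate, hcp]
    rw [PySem.List.foldl_append_singleton_eq_map
      (aEncRow ((List.range (b0.length - 1)).map
        (fun m => mkDict (colD (b0.drop 1 :: rest.map (fun r => r.drop 1)) m))))]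
    simp only [List.nil_append]
    have henc : ∀ row ∈ b0.drop 1 :: rest.map (fun r => r.drop 1),
        aEncRow ((List.range (b0.length - 1)).map
          (fun m => mkDict (colD (b0.drop 1 :: rest.map (fun r => r.drop 1)) m))) row
        = (List.range (b0.length - 1)).map
            (fun i => (mkDict (colD (b0.drop 1 :: rest.map (fun r => r.drop 1)) i)).getD
              (row.getD i "") 0) := by
      intro row hrow
      have hrl : row.length = b0.length - 1 := by
        have := HL row (by simpa using hrow)
        simpa using this
      rw [aEncRow_eq, hrl]
      refine List.map_congr_left ?_
      intro i hi
      rw [PySem.List.getD_map_range _ _ _ _ (List.mem_range.mp hi)]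
    rw [List.map_congr_left henc]
    norm_num
  -- ---- evaluate B ----
  have hbr : ∀ (st : List (PySem.Dict String Int) × List (List Int)) (row : List String),
      bRowStep st row = (fun st (q : List String) =>
        let r := (PySem.List.enumerate q 0).foldl bEncStep (st.1, [])
        (r.1, st.2 ++ [r.2])) st (row.drop 1) := by
    intro st row
    simp only [bRowStep, PySem.List.slice_from_one, List.drop_one]
  have hcb : (PySem.List.pyRange 0 ((b0.length : Int) - 1) 1).map
      (fun _ => (PySem.Dict.empty : PySem.Dict String Int))
      = List.replicate (b0.length - 1) PySem.Dict.empty := by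
    rw [show ((b0.length : Int) - 1) = ((b0.length - 1 : Nat) : Int) from by omega]
    exact range_map_empty _
  have hstart : List.replicate (b0.length - 1) (PySem.Dict.empty : PySem.Dict String Int)
      = (List.range (b0.length - 1)).map
          (fun i => mkDict ((colD ((b0 :: rest).map (fun r => r.drop 1)) i).take 0)) := by
    simp [mkDict]
  have hB : csv_to_vector_alt (r0 :: b0 :: rest)
      = ((PySem.List.enumerate (b0 :: rest) 2).map
           (fun p => PySem.Int.toStr p.1 ++ "_" ++ PySem.List.pyGetD p.2 0 ""),
         r0,
         ((b0 :: rest).map (fun r => r.drop 1)).map (fun row =>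
           (List.range (b0.length - 1)).map
             (fun i => (mkDict (colD ((b0 :: rest).map (fun r => r.drop 1)) i)).getD
               (row.getD i "") 0))) := by
    simp only [csv_to_vector_alt]
    rw [PySem.List.slice_from_one]
    simp only [List.tail_cons, PySem.List.pyGetD_zero_cons]
    rw [hcb]
    have hfold : (b0 :: rest).foldl bRowStep
        (List.replicate (b0.length - 1) PySem.Dict.empty, ([] : List (List Int)))
        = ((b0 :: rest).map (fun r => r.drop 1)).foldl (fun st q =>
            let r := (PySem.List.enumerate q 0).foldl bEncStep (st.1, [])
            (r.1, st.2 ++ [r.2]))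
          (List.replicate (b0.length - 1) PySem.Dict.empty, []) := by
      rw [List.foldl_map]
      congr 1
      funext st row
      exact hbr st row
    rw [hfold, hstart,
      B_loop ((b0 :: rest).map (fun r => r.drop 1)) (b0.length - 1) HL
        ((b0 :: rest).map (fun r => r.drop 1)) 0 [] (by rw [List.drop_zero])]
    simp only [List.nil_append]
  rw [hA, hB]
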